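-- pv_equiv track=rewrite | github.com/malrau/da_dcAI_project | c_selectData.py | classesToInt
-- ===== SOURCE A (Python) =====
-- def classesToInt(stringClasses):
--     intClasses = list()
--     for i in range(0, len(stringClasses)):
--         if i == 0:
--             intClasses.append(0)
--         else:
--             if stringClasses[i] == stringClasses[i - 1]:
--                 intClasses.append(intClasses[i - 1])
--             else:
--                 intClasses.append(intClasses[i - 1] + 1)
--     return intClasses
-- ===== SOURCE B (Python) =====
-- def classesToInt(stringClasses):
--     # Pass 1: change indicators (1 where the label differs from its predecessor).
--     indicators = [0 if i == 0 else (0 if stringClasses[i] == stringClasses[i - 1] else 1)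
--                   for i in range(len(stringClasses))]
--     # Pass 2: cumulative prefix sum of the indicators.
--     result = []
--     total = 0
--     for d in indicators:
--         total += d
--         result.append(total)
--     return result
-- ===== Notes on version B (the rewrite author's own statement) =====
-- stated objective: alternative
-- what changed: Replaces A's single loop that reads back its own output (intClasses[i-1]) with a diff-array-then-prefix-sum decomposition: first a pass building 0/1 change indicators, then a pass accumulating their running sum.
import Mathlib
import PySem

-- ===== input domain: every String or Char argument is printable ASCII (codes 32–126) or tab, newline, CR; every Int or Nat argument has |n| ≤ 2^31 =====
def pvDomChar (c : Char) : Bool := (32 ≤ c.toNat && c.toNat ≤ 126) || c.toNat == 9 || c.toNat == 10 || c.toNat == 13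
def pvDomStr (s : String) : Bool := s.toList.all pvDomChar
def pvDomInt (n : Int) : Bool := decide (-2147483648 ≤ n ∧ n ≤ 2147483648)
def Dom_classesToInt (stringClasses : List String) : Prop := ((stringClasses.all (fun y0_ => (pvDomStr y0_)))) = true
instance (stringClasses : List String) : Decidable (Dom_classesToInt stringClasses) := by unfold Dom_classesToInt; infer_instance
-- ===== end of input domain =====

-- B rewrites A's self-referential loop as two passes (change indicators, then their prefix sum); alternative decomposition, same cost.

-- ===== PORT A =====
-- A: one loop over indices appending to intClasses, re-reading intClasses[i-1].
-- All list indices here are in range, so getD with a default is exact for Python's s[i].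
def classesToInt (stringClasses : List String) : List Int :=
  (List.range stringClasses.length).foldl
    (fun intClasses i =>
      if i = 0 then intClasses ++ [0]
      else if stringClasses.getD i "" = stringClasses.getD (i - 1) "" then
        intClasses ++ [intClasses.getD (i - 1) 0]
      else
        intClasses ++ [intClasses.getD (i - 1) 0 + 1]) []

-- ===== PORT B =====
-- Pass 1 builds the indicator list; pass 2 folds it into a running-sum list.
def classesToInt_alt (stringClasses : List String) : List Int :=
  let indicators := (List.range stringClasses.length).map
    (fun i => if i = 0 then (0 : Int)
              else if stringClasses.getD i "" = stringClasses.getD (i - 1) "" then 0 else 1)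
  (indicators.foldl
    (fun (p : List Int × Int) d => (p.1 ++ [p.2 + d], p.2 + d)) ([], 0)).1

-- ===== PRECONDITION & SPEC =====
def Spec_classesToInt (stringClasses : List String) (out : List Int) : Prop := out = classesToInt_alt stringClasses
instance (stringClasses : List String) (out : List Int) : Decidable (Spec_classesToInt stringClasses out) := by unfold Spec_classesToInt; infer_instance

-- ===== CLAIM (what is proved, stated in full; the proofs are below) =====
def Claim_equal_classesToInt : Prop := ∀ (stringClasses : List String), Dom_classesToInt stringClasses → Spec_classesToInt stringClasses (classesToInt stringClasses)

-- ===== LEMMAS AND PROOFS =====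

-- the change indicator at index i
def pvInd (s : List String) (i : Nat) : Int :=
  if i = 0 then 0 else if s.getD i "" = s.getD (i - 1) "" then 0 else 1

-- cumulative sum of indicators up to index n
def pvCum (s : List String) : Nat → Int
  | 0 => 0
  | n + 1 => pvCum s n + pvInd s (n + 1)

theorem pvMapGetD (s : List String) (n i : Nat) (h : i < n) :
    (((List.range n).map (pvCum s)).getD i 0) = pvCum s i := by
  rw [List.getD_eq_getElem _ _ (by simpa using h)]
  simp

theorem pvA_inv (s : List String) (n : Nat) :
    (List.range n).foldl
      (fun intClasses i =>
        if i = 0 then intClasses ++ [0]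
        else if s.getD i "" = s.getD (i - 1) "" then
          intClasses ++ [intClasses.getD (i - 1) 0]
        else
          intClasses ++ [intClasses.getD (i - 1) 0 + 1]) []
    = (List.range n).map (pvCum s) := by
  induction n with
  | zero => simp
  | succ m ih =>
    rw [List.range_succ, List.foldl_append, ih, List.map_append]
    cases m with
    | zero => simp [pvCum]
    | succ k =>
      simp only [List.foldl_cons, List.foldl_nil, List.map_cons, List.map_nil]
      have hne : k + 1 ≠ 0 := by omega
      rw [if_neg hne]
      have hget : ((List.map (pvCum s) (List.range (k + 1))).getD (k + 1 - 1) 0)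
          = pvCum s k := by
        have := pvMapGetD s (k + 1) k (by omega)
        simpa using this
      by_cases hc : s.getD (k + 1) "" = s.getD (k + 1 - 1) ""
      · rw [if_pos hc, hget]
        have hc' : s[k + 1]?.getD "" = s[k]?.getD "" := by
          simpa [List.getD] using hc
        have : pvCum s (k + 1) = pvCum s k := by
          simp [pvCum, pvInd, hc']
        rw [this]
      · rw [if_neg hc, hget]
        have hc' : ¬ s[k + 1]?.getD "" = s[k]?.getD "" := by
          simpa [List.getD] using hc
        have : pvCum s (k + 1) = pvCum s k + 1 := by
          simp [pvCum, pvInd, hc']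
        rw [this]

theorem pvB_inv (s : List String) (n : Nat) :
    ((List.range n).map
        (fun i => if i = 0 then (0 : Int)
                  else if s.getD i "" = s.getD (i - 1) "" then 0 else 1)).foldl
      (fun (p : List Int × Int) d => (p.1 ++ [p.2 + d], p.2 + d)) ([], 0)
    = ((List.range n).map (pvCum s), pvCum s (n - 1)) := by
  induction n with
  | zero => simp [pvCum]
  | succ m ih =>
    rw [List.range_succ, List.map_append, List.foldl_append, ih]
    simp only [List.map_cons, List.map_nil, List.foldl_cons, List.foldl_nil,
      List.map_append]
    have key : pvCum s (m - 1) +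
        (if m = 0 then (0 : Int)
         else if s.getD m "" = s.getD (m - 1) "" then 0 else 1) = pvCum s m := by
      cases m with
      | zero => simp [pvCum]
      | succ k =>
        have hne : k + 1 ≠ 0 := by omega
        simp [pvCum, pvInd]
    rw [key]
    simp

-- ===== VERDICT (by name: the statement is the Claim_ definition above) =====
theorem classesToInt_spec : Claim_equal_classesToInt := by
  intro s _
  show classesToInt s = classesToInt_alt s
  unfold classesToInt classesToInt_alt
  rw [pvA_inv]
  simp only [pvB_inv]
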